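-- pv_equiv track=rewrite | github.com/coryrobbins/mynlp | src/data_preprocessing.py | space_after_punc
-- ===== SOURCE A (Python) =====
-- import string
--
-- def space_after_punc(text):
--     spaced_text = ''
--     for char in text:
--         if char in string.punctuation:
--             spaced_text += char + ' '
--         else:
--             spaced_text += char
--     return spaced_text
-- ===== SOURCE B (Python) =====
-- import string
--
-- def space_after_punc(text):
--     punc = set(string.punctuation)
--     cuts = [i + 1 for i, ch in enumerate(text) if ch in punc]
--     pieces = []
--     prev = 0
--     for c in cuts:
--         pieces.append(text[prev:c])
--         prev = c
--     pieces.append(text[prev:])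
--     return ' '.join(pieces)
-- ===== Notes on version B (the rewrite author's own statement) =====
-- stated objective: alternative
-- what changed: Instead of mapping each character to itself (plus a space when punctuation) in one loop, B works in stages: it computes the list of cut positions just after each punctuation character, slices the text into the segments between consecutive cuts, and joins the segments with a single space.
import Mathlib
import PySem

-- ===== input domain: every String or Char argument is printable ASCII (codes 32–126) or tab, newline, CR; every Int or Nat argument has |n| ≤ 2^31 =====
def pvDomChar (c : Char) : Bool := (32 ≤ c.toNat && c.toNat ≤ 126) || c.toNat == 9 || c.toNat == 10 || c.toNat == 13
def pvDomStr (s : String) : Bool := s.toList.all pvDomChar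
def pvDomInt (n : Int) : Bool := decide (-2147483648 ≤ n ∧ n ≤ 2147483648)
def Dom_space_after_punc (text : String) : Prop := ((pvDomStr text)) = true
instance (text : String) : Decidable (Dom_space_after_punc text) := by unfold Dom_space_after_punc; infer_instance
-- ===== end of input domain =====

-- B replaces A's per-character map with a staged algorithm: compute punctuation cut positions, slice the text into segments at those cuts, join the segments with spaces (alternative decomposition; same result).


-- ===== PORT A =====
-- string.punctuation, as a list of characters
def puncChars : List Char := "!\"#$%&'()*+,-./:;<=>?@[\\]^_`{|}~".toList

-- the loop 'for char in text: spaced_text += …' as a fold over the characters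
def space_after_punc (text : String) : String :=
  String.ofList (text.toList.foldl
    (fun acc c => if puncChars.contains c then acc ++ [c, ' '] else acc ++ [c]) [])

-- ===== PORT B =====
-- punc = set(string.punctuation)
def puncSet : PySem.Set Char := PySem.Set.ofList puncChars

-- cuts = [i + 1 for i, ch in enumerate(text) if ch in punc]
-- (hand port of the enumerate comprehension; the indices i and i+1 are nonnegative, kept as Nat)
def cutsOf : List Char → Nat → List Nat
  | [], _ => []
  | ch :: l, i => if ch ∈ puncSet then (i + 1) :: cutsOf l (i + 1) else cutsOf l (i + 1)

-- the 'for c in cuts' loop over (prev, pieces), then pieces.append(text[prev:]);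
-- text[prev:c] with 0 ≤ prev ≤ c is (l.drop prev).take (c - prev), exact by PySem.List.slice_natCast,
-- and text[prev:] is l.drop prev, exact by PySem.List.slice_from_natCast
def piecesLoop (l : List Char) : List Nat → Nat → List (List Char) → List (List Char)
  | [], prev, pieces => pieces ++ [l.drop prev]
  | c :: cs, prev, pieces => piecesLoop l cs c (pieces ++ [(l.drop prev).take (c - prev)])

-- ' '.join(pieces)
def space_after_punc_alt (text : String) : String :=
  String.ofList (PySem.Chars.join [' '] (piecesLoop text.toList (cutsOf text.toList 0) 0 []))

-- ===== PRECONDITION & SPEC =====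
def Spec_space_after_punc (text : String) (out : String) : Prop := out = space_after_punc_alt text
instance (text : String) (out : String) : Decidable (Spec_space_after_punc text out) := by unfold Spec_space_after_punc; infer_instance

-- ===== CLAIM (what is proved, stated in full; the proofs are below) =====
def Claim_equal_space_after_punc : Prop := ∀ (text : String), Dom_space_after_punc text → Spec_space_after_punc text (space_after_punc text)

-- ===== LEMMAS AND PROOFS =====
-- the per-character replacement A performs
def fA (c : Char) : List Char := if puncChars.contains c then [c, ' '] else [c]

-- the segments of l cut just after each punctuation character (proof-side characterisation)
def splitA : List Char → List (List Char)
  | [] => [[]]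
  | c :: l => if puncChars.contains c then [c] :: splitA l else (splitA l).modifyHead (c :: ·)

theorem splitA_ne_nil (l : List Char) : splitA l ≠ [] := by
  cases l with
  | nil => simp [splitA]
  | cons c l =>
    simp only [splitA]
    split
    · simp
    · cases h : splitA l with
      | nil => exact absurd h (splitA_ne_nil l)
      | cons p ps => simp

theorem mem_puncSet_iff (c : Char) : (c ∈ puncSet) ↔ puncChars.contains c = true := by
  unfold puncSet
  rw [PySem.Set.mem_ofList, List.contains_iff_mem]

-- A's fold is the flatMap of fA
theorem portA_eq_flatMap (l : List Char) :
    l.foldl (fun acc c => if puncChars.contains c then acc ++ [c, ' '] else acc ++ [c]) [] =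
      l.flatMap fA := by
  have h : (fun (acc : List Char) c => if puncChars.contains c then acc ++ [c, ' '] else acc ++ [c]) =
      (fun (acc : List Char) c => acc ++ fA c) := by
    funext acc c; unfold fA; split <;> rfl
  rw [h, PySem.List.foldl_append_eq_flatMap]
  simp

-- join with a single-space separator, head prepend
theorem join_head_cons (c : Char) (p : List Char) (ps : List (List Char)) :
    PySem.Chars.join [' '] ((c :: p) :: ps) = c :: PySem.Chars.join [' '] (p :: ps) := by
  cases ps with
  | nil => simp [PySem.Chars.join_singleton]
  | cons q qs => simp [PySem.Chars.join_cons_cons]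

-- joining the segments with spaces is A's flatMap
theorem join_splitA (l : List Char) :
    PySem.Chars.join [' '] (splitA l) = l.flatMap fA := by
  induction l with
  | nil => simp [splitA, PySem.Chars.join_singleton]
  | cons c l ih =>
    simp only [splitA, List.flatMap_cons]
    by_cases hc : puncChars.contains c = true
    · simp only [hc, if_pos]
      cases h : splitA l with
      | nil => exact absurd h (splitA_ne_nil l)
      | cons p ps =>
        rw [PySem.Chars.join_cons_cons, ← h, ih]
        have hm : c ∈ puncChars := by simpa using hc
        simp [fA, hm]
    · simp only [hc, if_neg, Bool.false_eq_true, not_false_iff]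
      cases h : splitA l with
      | nil => exact absurd h (splitA_ne_nil l)
      | cons p ps =>
        simp only [List.modifyHead]
        rw [join_head_cons, ← h, ih]
        have hm : c ∉ puncChars := by simpa using hc
        simp [fA, hm]

-- the pieces accumulator is a prefix
theorem piecesLoop_acc (l : List Char) (cs : List Nat) (prev : Nat) (pieces : List (List Char)) :
    piecesLoop l cs prev pieces = pieces ++ piecesLoop l cs prev [] := by
  induction cs generalizing prev pieces with
  | nil => simp [piecesLoop]
  | cons a as ih =>
    simp only [piecesLoop, List.nil_append]
    rw [ih a (pieces ++ [(l.drop prev).take (a - prev)]), ih a [(l.drop prev).take (a - prev)]]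
    simp

-- dropping the head shifts every cut and prev by one
theorem piecesLoop_shift (c : Char) (l : List Char) (cs : List Nat) (prev : Nat)
    (pieces : List (List Char)) :
    piecesLoop (c :: l) (cs.map (· + 1)) (prev + 1) pieces = piecesLoop l cs prev pieces := by
  induction cs generalizing prev pieces with
  | nil => simp [piecesLoop]
  | cons a as ih =>
    simp only [List.map_cons, piecesLoop, List.drop_succ_cons, Nat.add_sub_add_right]
    exact ih a _

-- cutsOf started one later is cutsOf shifted by one
theorem cutsOf_shift (l : List Char) (i : Nat) :
    cutsOf l (i + 1) = (cutsOf l i).map (· + 1) := by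
  induction l generalizing i with
  | nil => simp [cutsOf]
  | cons c l ih =>
    simp only [cutsOf]
    split <;> simp [ih]

-- B's staged slicing produces exactly the segments splitA describes
theorem piecesLoop_eq_splitA (l : List Char) :
    piecesLoop l (cutsOf l 0) 0 [] = splitA l := by
  induction l with
  | nil => simp [cutsOf, piecesLoop, splitA]
  | cons c l ih =>
    simp only [cutsOf, splitA]
    by_cases hc : puncChars.contains c = true
    · rw [if_pos ((mem_puncSet_iff c).mpr hc), if_pos hc]
      simp only [piecesLoop, List.drop_zero, Nat.sub_zero, List.take_succ_cons, List.take_zero,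
        List.nil_append]
      rw [cutsOf_shift, show (1 : Nat) = 0 + 1 from rfl, piecesLoop_shift, piecesLoop_acc, ih]
      simp
    · rw [if_neg (fun h => hc ((mem_puncSet_iff c).mp h)), if_neg (by simpa using hc),
        cutsOf_shift]
      cases hcs : cutsOf l 0 with
      | nil =>
        rw [hcs] at ih
        simp only [List.map_nil, piecesLoop, List.drop_zero, List.nil_append]
        simp only [piecesLoop, List.drop_zero, List.nil_append] at ih
        rw [← ih]
        rfl
      | cons a as =>
        rw [hcs] at ih
        simp only [List.map_cons, piecesLoop, List.drop_zero, Nat.sub_zero, List.take_succ_cons,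
          List.nil_append] at *
        rw [show a + 1 = a + 1 from rfl, piecesLoop_shift, piecesLoop_acc]
        rw [piecesLoop_acc] at ih
        rw [← ih]
        rfl

-- ===== VERDICT (by name: the statement is the Claim_ definition above) =====
theorem space_after_punc_spec : Claim_equal_space_after_punc := by
  intro text _
  unfold Spec_space_after_punc space_after_punc space_after_punc_alt
  rw [portA_eq_flatMap, piecesLoop_eq_splitA, join_splitA]
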